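-- pv_equiv track=rewrite | github.com/saga-cs/Projects | fall-2017-hw2-saga-cs/problem4.py | fill_completions
-- ===== SOURCE A (Python) =====
-- def fill_completions(fd):
-- 	c_dic = {}
-- 	punc = ['\'', '.', '?', ':', '"', ';', ',', '`', '<', '>', '-']
-- 	for line in fd:
-- 		line = line.replace('\n','')
-- 		lis = line.split(" ")
-- 		for word in lis:
-- 			for p in punc:
-- 				word=word.strip(p)
-- 				word = word.lower()
-- 			if len(word)>1 and word.isalpha():
-- 				for i in word:
-- 					key = (word.index(i),i)
-- 					c_dic.setdefault(key, set())
-- 					c_dic[key].add(word)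
-- 	return c_dic
-- ===== SOURCE B (Python) =====
-- def fill_completions(fd):
-- 	punc = ['\'', '.', '?', ':', '"', ';', ',', '`', '<', '>', '-']
--
-- 	def clean(word):
-- 		for p in punc:
-- 			word = word.strip(p).lower()
-- 		return word
--
-- 	# stage 1: distinct cleaned words that pass the filter, first-appearance order
-- 	words = dict.fromkeys(
-- 		w
-- 		for line in fd
-- 		for w in map(clean, line.replace('\n', '').split(' '))
-- 		if len(w) > 1 and w.isalpha())
--
-- 	# stage 2: one ((first-index, char), word) pair per distinct char of each word
-- 	pairs = [((j, c), w) for w in words for j, c in enumerate(w) if c not in w[:j]]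
--
-- 	# stage 3: group the pairs
-- 	c_dic = {}
-- 	for key, w in pairs:
-- 		c_dic.setdefault(key, set()).add(w)
-- 	return c_dic
-- ===== Notes on version B (the rewrite author's own statement) =====
-- stated objective: alternative
-- what changed: B is a three-stage pipeline instead of A's single nested loop: it first builds the ordered set of DISTINCT cleaned words that pass the filter (dict.fromkeys), so each repeated word is processed once (correct because reprocessing a word only re-adds it to sets that already contain it), then flattens each distinct word into ((first-index,char),word) pairs using a slice-membership test (c not in w[:j]) instead of A's per-char word.index scan, and finally groups the flat pair list into the dict.
import Mathlib
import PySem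

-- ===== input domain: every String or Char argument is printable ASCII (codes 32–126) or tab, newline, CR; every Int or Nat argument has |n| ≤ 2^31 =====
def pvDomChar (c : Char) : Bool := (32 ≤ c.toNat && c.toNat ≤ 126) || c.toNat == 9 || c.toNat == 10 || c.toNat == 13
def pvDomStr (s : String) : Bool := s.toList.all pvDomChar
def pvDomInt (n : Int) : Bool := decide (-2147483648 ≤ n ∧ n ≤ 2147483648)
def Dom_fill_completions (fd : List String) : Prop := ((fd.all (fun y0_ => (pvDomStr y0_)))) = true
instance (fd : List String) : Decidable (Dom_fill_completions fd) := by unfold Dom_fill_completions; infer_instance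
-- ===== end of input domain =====

-- B restructures A's single nested loop into a three-stage pipeline: distinct cleaned words
-- first (duplicates skipped entirely), then a flat ((first-index, char), word) pair list built
-- with a slice-membership test instead of A's per-char word.index scan, then one grouping pass.

-- ===== PORT A =====
-- helpers shared verbatim by both Pythons: the punctuation list, the strip/lower cleanup
-- loop, line splitting, and the 'c_dic.setdefault(key, set()); c_dic[key].add(word)' pair.
def pvPunc : List Char := ['\'', '.', '?', ':', '"', ';', ',', '`', '<', '>', '-']

def pvClean (word : List Char) : List Char :=
  pvPunc.foldl (fun w p => PySem.Chars.lower (PySem.Chars.stripChars w [p])) word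

def pvWordsOf (line : String) : List (List Char) :=
  PySem.Chars.splitOn (PySem.Chars.replace line.toList ['\n'] []) [' ']

def pvDicAdd (d : PySem.Dict (Int × String) (PySem.Set String)) (key : Int × String)
    (word : String) : PySem.Dict (Int × String) (PySem.Set String) :=
  (d.setdefault key PySem.Set.empty).modify key PySem.Set.empty (fun s => PySem.Set.add s word)

def pvStepA (d : PySem.Dict (Int × String) (PySem.Set String)) (word : List Char) :
    PySem.Dict (Int × String) (PySem.Set String) :=
  if 1 < PySem.Chars.len word ∧ PySem.Chars.strIsalpha word then
    word.foldl
      (fun d c => pvDicAdd d (PySem.Chars.find word [c], String.ofList [c]) (String.ofList word)) d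
  else d

def fill_completions (fd : List String) : List (Int × String × List String) :=
  (fd.foldl
      (fun d line => (pvWordsOf line).foldl (fun d w => pvStepA d (pvClean w)) d)
      PySem.Dict.empty).items.map (fun p => (p.1.1, p.1.2, p.2))

-- ===== PORT B =====
-- 'len(w) > 1 and w.isalpha()'
def pvPred (w : List Char) : Bool := decide (1 < PySem.Chars.len w) && PySem.Chars.strIsalpha w

-- '[((j, c), w) for j, c in enumerate(w) if c not in w[:j]]'
def pvPairsOf (w : List Char) : List ((Int × String) × String) :=
  ((PySem.List.enumerate w 0).filter
      (fun p => ! PySem.Chars.isIn [p.2] (PySem.List.slice w none (some p.1)))).map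
    (fun p => ((p.1, String.ofList [p.2]), String.ofList w))

def fill_completions_alt (fd : List String) : List (Int × String × List String) :=
  let words : List (List Char) :=
    PySem.List.dedup
      ((fd.flatMap (fun line => (pvWordsOf line).map pvClean)).filter pvPred)
  let pairs : List ((Int × String) × String) := words.flatMap pvPairsOf
  (pairs.foldl (fun d p => pvDicAdd d p.1 p.2) PySem.Dict.empty).items.map
    (fun p => (p.1.1, p.1.2, p.2))

-- ===== PRECONDITION & SPEC =====
def Spec_fill_completions (fd : List String) (out : List (Int × String × List String)) : Prop := out = fill_completions_alt fd
instance (fd : List String) (out : List (Int × String × List String)) : Decidable (Spec_fill_completions fd out) := by unfold Spec_fill_completions; infer_instance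

-- ===== CLAIM (what is proved, stated in full; the proofs are below) =====
def Claim_equal_fill_completions : Prop := ∀ (fd : List String), Dom_fill_completions fd → Spec_fill_completions fd (fill_completions fd)

-- ===== LEMMAS AND PROOFS =====

-- B's per-word step: fold its pair list into the dict
def pvStepC (d : PySem.Dict (Int × String) (PySem.Set String)) (w : List Char) :
    PySem.Dict (Int × String) (PySem.Set String) :=
  (pvPairsOf w).foldl (fun d p => pvDicAdd d p.1 p.2) d

-- 'key already holds the word' for every pair of w
def pvGood (d : PySem.Dict (Int × String) (PySem.Set String)) (w : List Char) : Prop :=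
  ∀ p ∈ pvPairsOf w, ∃ s, d.get? p.1 = some s ∧ p.2 ∈ s

-- ordered dedup of l relative to an already-seen set
def pvDedupFrom (seen : PySem.Set (List Char)) : List (List Char) → List (List Char)
  | [] => []
  | w :: l => if PySem.Set.contains seen w then pvDedupFrom seen l
              else w :: pvDedupFrom (PySem.Set.add seen w) l

lemma pvDicAdd_eq (d : PySem.Dict (Int × String) (PySem.Set String)) (k : Int × String)
    (W : String) :
    pvDicAdd d k W = d.insert k (PySem.Set.add (d.getD k PySem.Set.empty) W) := by
  unfold pvDicAdd
  cases h : d.contains k with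
  | true =>
    rw [PySem.Dict.setdefault_of_contains d _ h]
    rfl
  | false =>
    rw [PySem.Dict.setdefault_of_not_contains d _ h]
    simp only [PySem.Dict.modify, PySem.Dict.getD_insert_self, PySem.Dict.insert_insert_self,
      PySem.Dict.getD_of_not_contains d _ h]

lemma pv_insert_get (d : PySem.Dict (Int × String) (PySem.Set String)) (k : Int × String)
    (v : PySem.Set String) (hnd : d.keys.Nodup) (h : d.get? k = some v) : d.insert k v = d := by
  have hc : d.contains k = true := by
    rw [PySem.Dict.contains_eq_isSome_get?, h]; rfl
  apply PySem.Dict.ext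
  rw [PySem.Dict.items_insert_of_contains d v hc]
  conv_rhs => rw [← List.map_id d.items]
  apply List.map_congr_left
  intro p hp
  by_cases hpk : p.1 = k
  · have hm : (k, p.2) ∈ d.items := by
      have : p = (k, p.2) := by cases p; simp_all
      rw [← this]; exact hp
    have h2 := PySem.Dict.get?_of_mem_items d hm hnd
    rw [h] at h2
    have hv : v = p.2 := by injection h2
    have : p = (k, v) := by cases p; simp_all
    simp [this]
  · simp [hpk]

lemma pv_dicAdd_noop (d : PySem.Dict (Int × String) (PySem.Set String)) (k : Int × String)
    (W : String) (s : PySem.Set String) (hnd : d.keys.Nodup)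
    (h : d.get? k = some s) (hW : W ∈ s) : pvDicAdd d k W = d := by
  rw [pvDicAdd_eq, PySem.Dict.getD_of_get?_eq_some d _ h]
  have hadd : PySem.Set.add s W = s := by simp [PySem.Set.add, hW]
  rw [hadd]
  exact pv_insert_get d _ s hnd h

lemma pv_dicAdd_nodup (d : PySem.Dict (Int × String) (PySem.Set String)) (k : Int × String)
    (W : String) (hnd : d.keys.Nodup) : (pvDicAdd d k W).keys.Nodup := by
  rw [pvDicAdd_eq]; exact PySem.Dict.nodup_keys_insert _ _ _ hnd

-- membership in a key's set survives one pvDicAdd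
lemma pv_mem_mono (d : PySem.Dict (Int × String) (PySem.Set String)) (k k' : Int × String)
    (W x : String) (s : PySem.Set String) (h : d.get? k = some s) (hx : x ∈ s) :
    ∃ s', (pvDicAdd d k' W).get? k = some s' ∧ x ∈ s' := by
  rw [pvDicAdd_eq]
  by_cases hk : k = k'
  · subst hk
    exact ⟨_, PySem.Dict.get?_insert_self _ _ _,
      (PySem.Set.mem_add _ _ _).mpr (Or.inl (by rwa [PySem.Dict.getD_of_get?_eq_some d _ h]))⟩
  · exact ⟨s, by rw [PySem.Dict.get?_insert_of_ne _ _ hk]; exact h, hx⟩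

-- … and survives a whole fold of pvDicAdds
lemma pv_mem_mono_fold (ps : List ((Int × String) × String)) :
    ∀ (d : PySem.Dict (Int × String) (PySem.Set String)) (k : Int × String) (x : String)
      (s : PySem.Set String), d.get? k = some s → x ∈ s →
      ∃ s', (ps.foldl (fun d p => pvDicAdd d p.1 p.2) d).get? k = some s' ∧ x ∈ s' := by
  induction ps with
  | nil => intro d k x s h hx; exact ⟨s, h, hx⟩
  | cons q ps' ih =>
    intro d k x s h hx
    obtain ⟨s1, h1, hx1⟩ := pv_mem_mono d k q.1 q.2 x s h hx
    exact ih _ k x s1 h1 hx1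

lemma pv_fold_nodup (ps : List ((Int × String) × String)) :
    ∀ (d : PySem.Dict (Int × String) (PySem.Set String)), d.keys.Nodup →
      (ps.foldl (fun d p => pvDicAdd d p.1 p.2) d).keys.Nodup := by
  induction ps with
  | nil => intro d hnd; exact hnd
  | cons q ps' ih => intro d hnd; exact ih _ (pv_dicAdd_nodup d q.1 q.2 hnd)

-- after folding a pair list, every pair's key holds its word
lemma pv_fold_good (ps : List ((Int × String) × String)) :
    ∀ (d : PySem.Dict (Int × String) (PySem.Set String)), ∀ p ∈ ps,
      ∃ s, (ps.foldl (fun d p => pvDicAdd d p.1 p.2) d).get? p.1 = some s ∧ p.2 ∈ s := by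
  induction ps with
  | nil => intro d p hp; cases hp
  | cons q ps' ih =>
    intro d p hp
    rcases List.mem_cons.mp hp with rfl | hp'
    · rw [List.foldl_cons]
      have h1 : (pvDicAdd d p.1 p.2).get? p.1
          = some (PySem.Set.add (d.getD p.1 PySem.Set.empty) p.2) := by
        rw [pvDicAdd_eq, PySem.Dict.get?_insert_self]
      exact pv_mem_mono_fold ps' _ p.1 p.2 _ h1
        ((PySem.Set.mem_add _ _ _).mpr (Or.inr rfl))
    · exact ih _ p hp'

-- folding the pairs of an already-represented word changes nothing
lemma pv_fold_noop (ps : List ((Int × String) × String)) :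
    ∀ (d : PySem.Dict (Int × String) (PySem.Set String)), d.keys.Nodup →
      (∀ p ∈ ps, ∃ s, d.get? p.1 = some s ∧ p.2 ∈ s) →
      ps.foldl (fun d p => pvDicAdd d p.1 p.2) d = d := by
  induction ps with
  | nil => intro d _ _; rfl
  | cons q ps' ih =>
    intro d hnd hg
    obtain ⟨s, hs, hW⟩ := hg q (List.mem_cons_self)
    rw [List.foldl_cons, pv_dicAdd_noop d q.1 q.2 s hnd hs hW]
    exact ih d hnd (fun p hp => hg p (List.mem_cons_of_mem _ hp))

lemma pv_find_fresh (pre suf : List Char) (c : Char) (hc : c ∉ pre) :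
    PySem.Chars.find (pre ++ c :: suf) [c] = (pre.length : Int) := by
  have hinf : [c] <:+: pre ++ c :: suf := ⟨pre, suf, by simp⟩
  have h0 : 0 ≤ PySem.Chars.find (pre ++ c :: suf) [c] :=
    (PySem.Chars.find_nonneg_iff _ _).mpr hinf
  obtain ⟨hpref, hmin⟩ := PySem.Chars.find_spec h0
  have hle : (PySem.Chars.find (pre ++ c :: suf) [c]).toNat ≤ pre.length := by
    by_contra hgt
    exact hmin pre.length (by omega) (by rw [List.drop_left]; exact ⟨suf, rfl⟩)
  have hne : ¬ (PySem.Chars.find (pre ++ c :: suf) [c]).toNat < pre.length := by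
    intro hlt
    obtain ⟨l', hl', -⟩ := List.cons_prefix_iff.mp hpref
    apply hc
    have hg0 : (List.drop (PySem.Chars.find (pre ++ c :: suf) [c]).toNat (pre ++ c :: suf))[0]'(by
        rw [hl']; simp) = c := by simp [hl']
    rw [List.getElem_drop] at hg0
    simp only [Nat.add_zero] at hg0
    rw [List.getElem_append_left hlt] at hg0
    rw [← hg0]
    exact List.getElem_mem _
  omega

-- the (j, c) pairs of one word have pairwise distinct keys in the char component
lemma pv_key_ne {c c' : Char} (h : c' ≠ c) (i j : Int) :
    ((i, String.ofList [c']) : Int × String) ≠ (j, String.ofList [c]) := by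
  intro he
  apply h
  have := congrArg (fun p => p.2.toList) he
  simpa using this

-- the filter test 'c not in w[:j]' at absolute index pre.length reads exactly 'c ∈ pre'
lemma pv_filter_head (pre suf : List Char) (c : Char) :
    (PySem.Chars.isIn [c] (PySem.List.slice (pre ++ suf) none (some (pre.length : Int))) = true)
      ↔ c ∈ pre := by
  rw [PySem.List.slice_to_natCast, List.take_left, PySem.Chars.isIn_iff_infix,
    List.singleton_infix_iff]

-- core per-word equivalence: A's word.index loop = B's filtered-enumerate pair fold
lemma pv_inner (w : List Char) :
    ∀ (suf pre : List Char) (d : PySem.Dict (Int × String) (PySem.Set String)),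
      w = pre ++ suf → d.keys.Nodup →
      (∀ c ∈ pre, ∃ s, d.get? (PySem.Chars.find w [c], String.ofList [c]) = some s ∧
        String.ofList w ∈ s) →
      suf.foldl
          (fun d c => pvDicAdd d (PySem.Chars.find w [c], String.ofList [c]) (String.ofList w)) d
        = (((PySem.List.enumerate suf (pre.length : Int)).filter
              (fun p => ! PySem.Chars.isIn [p.2] (PySem.List.slice w none (some p.1)))).map
            (fun p => ((p.1, String.ofList [p.2]), String.ofList w))).foldl
            (fun d p => pvDicAdd d p.1 p.2) d := by
  intro suf
  induction suf with
  | nil => intro pre d hw hnd hinv; simp [PySem.List.enumerate]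
  | cons c suf' ih =>
    intro pre d hw hnd hinv
    have henum : PySem.List.enumerate (c :: suf') (pre.length : Int)
        = ((pre.length : Int), c) :: PySem.List.enumerate suf' ((pre.length : Int) + 1) := by
      simp [PySem.List.enumerate]
    by_cases hc : c ∈ pre
    · have hfilt : PySem.Chars.isIn [c] (PySem.List.slice w none (some (pre.length : Int)))
          = true := by rw [hw]; exact (pv_filter_head pre (c :: suf') c).mpr hc
      obtain ⟨s, hs, hWs⟩ := hinv c hc
      have hA : pvDicAdd d (PySem.Chars.find w [c], String.ofList [c]) (String.ofList w) = d :=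
        pv_dicAdd_noop d _ _ s hnd hs hWs
      have := ih (pre ++ [c]) d (by rw [hw]; simp) hnd (by
        intro c' hc'
        rcases List.mem_append.mp hc' with h | h
        · exact hinv c' h
        · simp only [List.mem_singleton] at h; subst h; exact ⟨s, hs, hWs⟩)
      rw [List.length_append, List.length_singleton, Nat.cast_add, Nat.cast_one] at this
      rw [List.foldl_cons, henum, hA, this]
      rw [List.filter_cons_of_neg (by simpa using hfilt)]
    · have hfilt : PySem.Chars.isIn [c] (PySem.List.slice w none (some (pre.length : Int)))
          = false := by
        rw [hw]
        exact Bool.eq_false_iff.mpr (fun h => hc ((pv_filter_head pre (c :: suf') c).mp h))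
      have hk : PySem.Chars.find w [c] = (pre.length : Int) := by
        rw [hw]; exact pv_find_fresh pre suf' c hc
      have hnd' : (pvDicAdd d ((pre.length : Int), String.ofList [c])
          (String.ofList w)).keys.Nodup := pv_dicAdd_nodup d _ _ hnd
      have hinv' : ∀ c' ∈ pre ++ [c], ∃ s,
          (pvDicAdd d ((pre.length : Int), String.ofList [c]) (String.ofList w)).get?
            (PySem.Chars.find w [c'], String.ofList [c']) = some s ∧ String.ofList w ∈ s := by
        intro c' hc'
        rcases List.mem_append.mp hc' with h | h
        · obtain ⟨s, hs, hWs⟩ := hinv c' h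
          refine ⟨s, ?_, hWs⟩
          rw [pvDicAdd_eq, PySem.Dict.get?_insert_of_ne _ _
            (pv_key_ne (by rintro rfl; exact hc h) _ _)]
          exact hs
        · have h' : c' = c := by simpa using h
          refine ⟨PySem.Set.add (d.getD ((pre.length : Int), String.ofList [c])
            PySem.Set.empty) (String.ofList w), ?_, ?_⟩
          · rw [h', hk, pvDicAdd_eq, PySem.Dict.get?_insert_self]
          · exact (PySem.Set.mem_add _ _ _).mpr (Or.inr rfl)
      have := ih (pre ++ [c]) (pvDicAdd d ((pre.length : Int), String.ofList [c]) (String.ofList w))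
        (by rw [hw]; simp) hnd' hinv'
      rw [List.length_append, List.length_singleton, Nat.cast_add, Nat.cast_one] at this
      rw [List.foldl_cons, henum, hk, this]
      rw [List.filter_cons_of_pos (by simpa using hfilt)]
      simp

-- A's per-word step equals 'if the filter passes, fold B's pair list'
lemma pv_step_eq (d : PySem.Dict (Int × String) (PySem.Set String)) (hnd : d.keys.Nodup)
    (w : List Char) : pvStepA d w = if pvPred w then pvStepC d w else d := by
  unfold pvStepA
  have hpred : (1 < PySem.Chars.len w ∧ PySem.Chars.strIsalpha w) ↔ pvPred w = true := by
    simp [pvPred]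
  split_ifs with h h2 h2
  · have := pv_inner w w [] d rfl hnd (by intro c hc; cases hc)
    simpa [pvStepC, pvPairsOf] using this
  · exact absurd (hpred.mp h) h2
  · exact absurd (hpred.mpr h2) h
  · rfl

lemma pv_stepA_nodup (d : PySem.Dict (Int × String) (PySem.Set String)) (hnd : d.keys.Nodup)
    (w : List Char) : (pvStepA d w).keys.Nodup := by
  rw [pv_step_eq d hnd w]
  split_ifs with h
  · exact pv_fold_nodup _ d hnd
  · exact hnd

-- replace pvStepA by the B-shaped step all along a word list
lemma pv_mix (l : List (List Char)) :
    ∀ (d : PySem.Dict (Int × String) (PySem.Set String)), d.keys.Nodup →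
      l.foldl pvStepA d = l.foldl (fun d w => if pvPred w then pvStepC d w else d) d := by
  induction l with
  | nil => intro d _; rfl
  | cons w l' ih =>
    intro d hnd
    rw [List.foldl_cons, List.foldl_cons, ← pv_step_eq d hnd w]
    exact ih _ (pv_stepA_nodup d hnd w)

lemma pv_stepC_nodup (d : PySem.Dict (Int × String) (PySem.Set String)) (hnd : d.keys.Nodup)
    (w : List Char) : (pvStepC d w).keys.Nodup := pv_fold_nodup _ d hnd

-- duplicates contribute nothing: folding a word list = folding its dedup-from-seen
lemma pv_dedup_fold (l : List (List Char)) :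
    ∀ (seen : PySem.Set (List Char)) (d : PySem.Dict (Int × String) (PySem.Set String)),
      d.keys.Nodup → (∀ w ∈ seen, pvGood d w) →
      l.foldl pvStepC d = (pvDedupFrom seen l).foldl pvStepC d := by
  induction l with
  | nil => intro seen d _ _; rfl
  | cons w l' ih =>
    intro seen d hnd hg
    by_cases hc : PySem.Set.contains seen w = true
    · have hw : w ∈ seen := (PySem.Set.contains_iff _ _).mp hc
      have hnoop : pvStepC d w = d := pv_fold_noop _ d hnd (hg w hw)
      rw [List.foldl_cons, hnoop, pvDedupFrom, if_pos hc]
      exact ih seen d hnd hg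
    · rw [List.foldl_cons, pvDedupFrom, if_neg hc, List.foldl_cons]
      refine ih (PySem.Set.add seen w) (pvStepC d w) (pv_stepC_nodup d hnd w) ?_
      intro v hv p hp
      rcases (PySem.Set.mem_add _ _ _).mp hv with hv' | rfl
      · obtain ⟨s, hs, hx⟩ := hg v hv' p hp
        exact pv_mem_mono_fold _ d p.1 p.2 s hs hx
      · exact pv_fold_good _ d p hp

-- dedup-from-the-empty-set is exactly PySem.List.dedup
lemma pv_dedupFrom_append (l : List (List Char)) :
    ∀ (seen : PySem.Set (List Char)),
      seen ++ pvDedupFrom seen l = l.foldl PySem.Set.add seen := by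
  induction l with
  | nil => intro seen; simp [pvDedupFrom]
  | cons w l' ih =>
    intro seen
    by_cases hc : PySem.Set.contains seen w = true
    · have hw : w ∈ seen := (PySem.Set.contains_iff _ _).mp hc
      have hadd : PySem.Set.add seen w = seen := by simp [PySem.Set.add, hw]
      rw [pvDedupFrom, if_pos hc, List.foldl_cons, hadd]
      exact ih seen
    · have hw : w ∉ seen := fun h => hc ((PySem.Set.contains_iff _ _).mpr h)
      have hadd : PySem.Set.add seen w = seen ++ [w] := by simp [PySem.Set.add, hw]
      rw [pvDedupFrom, if_neg hc, List.foldl_cons, ← ih (PySem.Set.add seen w), hadd]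
      simp
lemma pv_dedupFrom_nil (l : List (List Char)) :
    pvDedupFrom PySem.Set.empty l = PySem.List.dedup l := by
  have := pv_dedupFrom_append l PySem.Set.empty
  rw [PySem.List.dedup_eq_ofList, PySem.Set.ofList_eq_foldl]
  simpa [PySem.Set.empty] using this

-- ===== VERDICT (by name: the statement is the Claim_ definition above) =====
theorem fill_completions_spec : Claim_equal_fill_completions := by
  intro fd _
  unfold Spec_fill_completions fill_completions fill_completions_alt
  simp only [← List.foldl_map (f := pvClean) (g := pvStepA), ← List.foldl_flatMap]
  rw [pv_mix _ PySem.Dict.empty PySem.Dict.nodup_keys_empty,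
    PySem.List.foldl_if_eq_foldl_filter pvPred pvStepC,
    pv_dedup_fold _ PySem.Set.empty PySem.Dict.empty PySem.Dict.nodup_keys_empty
      (by intro w hw; cases hw),
    pv_dedupFrom_nil, List.foldl_flatMap]
  rfl
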